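-- pv_equiv track=rewrite | github.com/PLeVasseur/opencode-project-agents | fls/reports/system-abi-variadic-tooling-restack-20260207T144017Z/integration-before.changelog_assistant.py | top_level_entry_blocks
-- ===== SOURCE A (Python) =====
-- def top_level_entry_blocks(lines, body_start, body_end):
--     starts = [index for index in range(body_start, body_end) if lines[index].startswith("- ")]
--     blocks = []
--     for entry_index, start in enumerate(starts, start=1):
--         end = starts[entry_index] if entry_index < len(starts) else body_end
--         blocks.append({
--             "start": start,
--             "end": end,
--             "entry_index": entry_index,
--             "line": start + 1,
--         })
--     return blocks
-- ===== SOURCE B (Python) =====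
-- def top_level_entry_blocks(lines, body_start, body_end):
--     blocks = []
--     entry = 0
--     for index in range(body_start, body_end):
--         if lines[index].startswith("- "):
--             if blocks:
--                 blocks[-1]["end"] = index
--             entry += 1
--             blocks.append({
--                 "start": index,
--                 "end": body_end,
--                 "entry_index": entry,
--                 "line": index + 1,
--             })
--     return blocks
-- ===== Notes on version B (the rewrite author's own statement) =====
-- stated objective: simpler
-- what changed: Replaces the two-pass version (collect a starts list, then enumerate it with a lookahead starts[entry_index]) by one linear pass that appends each block with a tentative end=body_end and back-patches the previous block's end when the next start appears.
import Mathlib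
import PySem

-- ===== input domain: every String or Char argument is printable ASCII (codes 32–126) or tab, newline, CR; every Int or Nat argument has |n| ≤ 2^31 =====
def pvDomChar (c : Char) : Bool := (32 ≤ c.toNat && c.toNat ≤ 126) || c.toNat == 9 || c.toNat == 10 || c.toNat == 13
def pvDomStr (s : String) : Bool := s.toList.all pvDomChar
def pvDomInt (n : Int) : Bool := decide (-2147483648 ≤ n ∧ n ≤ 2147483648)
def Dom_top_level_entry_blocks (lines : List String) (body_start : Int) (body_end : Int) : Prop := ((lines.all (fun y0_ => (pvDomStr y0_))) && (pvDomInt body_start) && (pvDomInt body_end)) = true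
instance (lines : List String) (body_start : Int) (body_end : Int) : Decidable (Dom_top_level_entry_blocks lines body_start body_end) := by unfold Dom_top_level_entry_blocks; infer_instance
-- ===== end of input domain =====

-- B builds the blocks in one pass (tentative end=body_end, back-patched when the next start
-- appears) instead of A's two passes (starts list, then enumerate with a lookahead). Objective: simpler.

-- ===== PORT A =====
-- starts = [index for index in range(body_start, body_end) if lines[index].startswith("- ")]
-- then: for entry_index, start in enumerate(starts, start=1): end = starts[entry_index] if entry_index < len(starts) else body_end
def top_level_entry_blocks (lines : List String) (body_start : Int) (body_end : Int) : List (List (String × Int)) :=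
  let starts : List Int := (PySem.List.pyRange body_start body_end 1).filter
      (fun index => PySem.Str.startswith (PySem.List.pyGetD lines index "") "- ")
  (PySem.List.enumerate starts 1).foldl (fun blocks p =>
    let entry_index : Int := p.1
    let start : Int := p.2
    let e : Int := if entry_index < PySem.List.len starts then PySem.List.pyGetD starts entry_index 0 else body_end
    blocks ++ [[("start", start), ("end", e), ("entry_index", entry_index), ("line", start + 1)]]) []

-- ===== PORT B =====
-- blocks[-1]["end"] = index : overwrite the "end" key of the last block
def pvSetEnd (blk : List (String × Int)) (v : Int) : List (String × Int) :=
  blk.map (fun kv => if kv.1 = "end" then ("end", v) else kv)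

def pvPatchLast (bs : List (List (String × Int))) (v : Int) : List (List (String × Int)) :=
  match bs with
  | [] => []
  | [x] => [pvSetEnd x v]
  | x :: y :: rest => x :: pvPatchLast (y :: rest) v

def top_level_entry_blocks_alt (lines : List String) (body_start : Int) (body_end : Int) : List (List (String × Int)) :=
  ((PySem.List.pyRange body_start body_end 1).foldl (fun st index =>
      if PySem.Str.startswith (PySem.List.pyGetD lines index "") "- " then
        (pvPatchLast st.1 index ++
          [[("start", index), ("end", body_end), ("entry_index", st.2 + 1), ("line", index + 1)]],
         st.2 + 1)
      else st)
    (([] : List (List (String × Int))), (0 : Int))).1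

-- ===== PRECONDITION & SPEC =====
-- Pre_ excludes exactly the inputs where A raises IndexError (B raises there too).
def Pre_top_level_entry_blocks (lines : List String) (body_start : Int) (body_end : Int) : Prop :=
  -- every index of range(body_start, body_end) must be a valid Python index into lines:
  -- otherwise evaluating lines[index].startswith("- ") raises IndexError
  body_start < body_end → -(lines.length : Int) ≤ body_start ∧ body_end ≤ (lines.length : Int)
instance (lines : List String) (body_start : Int) (body_end : Int) : Decidable (Pre_top_level_entry_blocks lines body_start body_end) := by unfold Pre_top_level_entry_blocks; infer_instance

def pvWitness_top_level_entry_blocks : List String × Int × Int := (["intro", "- first", "text", "- second"], 1, 4)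

def Spec_top_level_entry_blocks (lines : List String) (body_start : Int) (body_end : Int) (out : List (List (String × Int))) : Prop := out = top_level_entry_blocks_alt lines body_start body_end
instance (lines : List String) (body_start : Int) (body_end : Int) (out : List (List (String × Int))) : Decidable (Spec_top_level_entry_blocks lines body_start body_end out) := by unfold Spec_top_level_entry_blocks; infer_instance

-- ===== CLAIM (what is proved, stated in full; the proofs are below) =====
def Claim_equal_top_level_entry_blocks : Prop := ∀ (lines : List String) (body_start : Int) (body_end : Int), Dom_top_level_entry_blocks lines body_start body_end → Pre_top_level_entry_blocks lines body_start body_end → Spec_top_level_entry_blocks lines body_start body_end (top_level_entry_blocks lines body_start body_end)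

-- ===== LEMMAS AND PROOFS =====

-- a guarded fold is the fold over the filtered list
theorem pvFoldlFilter {α β : Type} (p : α → Bool) (g : β → α → β) :
    ∀ (l : List α) (init : β),
      l.foldl (fun s i => if p i then g s i else s) init = (l.filter p).foldl g init := by
  intro l
  induction l with
  | nil => intro init; rfl
  | cons x t ih =>
    intro init
    by_cases h : p x = true
    · simp [h, ih]
    · simp [h, ih]

def pvMk (s e k : Int) : List (String × Int) :=
  [("start", s), ("end", e), ("entry_index", k), ("line", s + 1)]

def pvF (starts : List Int) (body_end : Int) (p : Int × Int) : List (String × Int) :=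
  pvMk p.2 (if p.1 < PySem.List.len starts then PySem.List.pyGetD starts p.1 0 else body_end) p.1

-- A's block builder as a map over the enumerated starts list
def pvAmap (starts : List Int) (body_end : Int) : List (List (String × Int)) :=
  (PySem.List.enumerate starts 1).map (pvF starts body_end)

theorem pvSetEnd_mk (s e k v : Int) : pvSetEnd (pvMk s e k) v = pvMk s v k := by
  simp [pvSetEnd, pvMk]

theorem pvPatchLast_append {L : List (List (String × Int))} (z : List (String × Int)) (v : Int) :
    pvPatchLast (L ++ [z]) v = L ++ [pvSetEnd z v] := by
  induction L with
  | nil => rfl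
  | cons x t ih =>
    cases t with
    | nil => rfl
    | cons y r => simpa [pvPatchLast] using ih

theorem pvMemEnumerate {α : Type} {p : Int × α} {s : List α} {a : Int}
    (h : p ∈ PySem.List.enumerate s a) : a ≤ p.1 ∧ p.1 < a + s.length := by
  rcases (PySem.List.mem_enumerate_iff s a p).1 h with ⟨k, hk, rfl⟩
  constructor <;> omega

-- the front of the map is unchanged except that the old last block's end is back-patched to x
theorem pvFront (s : List Int) (x body_end : Int) :
    (PySem.List.enumerate s 1).map (pvF (s ++ [x]) body_end)
      = pvPatchLast ((PySem.List.enumerate s 1).map (pvF s body_end)) x := by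
  cases s using List.reverseRecOn with
  | nil => simp [PySem.List.enumerate_nil, pvPatchLast]
  | append_singleton t y =>
    rw [PySem.List.enumerate_append]
    simp only [List.map_append, PySem.List.enumerate_cons, PySem.List.enumerate_nil,
      List.map_cons, List.map_nil]
    rw [pvPatchLast_append]
    have hfront : ∀ p ∈ PySem.List.enumerate t 1,
        pvF ((t ++ [y]) ++ [x]) body_end p = pvF (t ++ [y]) body_end p := by
      intro p hp
      have hb := pvMemEnumerate hp
      have h1 : p.1 < PySem.List.len ((t ++ [y]) ++ [x]) := by
        simp only [PySem.List.len_eq, List.length_append, List.length_cons, List.length_nil]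
        push_cast; omega
      have h2 : p.1 < PySem.List.len (t ++ [y]) := by
        simp only [PySem.List.len_eq, List.length_append, List.length_cons, List.length_nil]
        push_cast; omega
      have h0 : (0:Int) ≤ p.1 := by omega
      have hlen2 : p.1 < ((t ++ [y]).length : Int) := by simpa using h2
      have hlen1 : p.1 < (((t ++ [y]) ++ [x]).length : Int) := by simpa using h1
      unfold pvF
      rw [if_pos h1, if_pos h2,
          PySem.List.pyGetD_eq_getElem _ _ h0 hlen1,
          PySem.List.pyGetD_eq_getElem _ _ h0 hlen2]
      congr 1
      rw [List.getElem_append_left]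
    rw [List.map_congr_left hfront]
    congr 1
    -- last element of the front: end changes from body_end to x
    rw [pvF, pvF]
    have hlt : (1 : Int) + t.length < PySem.List.len ((t ++ [y]) ++ [x]) := by
      simp only [PySem.List.len_eq, List.length_append, List.length_cons, List.length_nil]
      push_cast; omega
    have hnlt : ¬ ((1 : Int) + t.length < PySem.List.len (t ++ [y])) := by
      simp only [PySem.List.len_eq, List.length_append, List.length_cons, List.length_nil]
      push_cast; omega
    rw [if_pos hlt, if_neg hnlt]
    have hval : PySem.List.pyGetD ((t ++ [y]) ++ [x]) (1 + (t.length : Int)) 0 = x := by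
      have h0 : (0:Int) ≤ 1 + (t.length : Int) := by omega
      have hl : (1 + (t.length : Int)) < ((((t ++ [y]) ++ [x]).length : Nat) : Int) := by
        simp; omega
      rw [PySem.List.pyGetD_eq_getElem _ _ h0 hl]
      have hidx : (1 + (t.length : Int)).toNat = (t ++ [y]).length := by simp; omega
      simp only [hidx]
      simp
    rw [hval, pvSetEnd_mk]

-- the snoc step of A's construction: one more start back-patches the previous last block
theorem pvAmap_snoc (s : List Int) (x body_end : Int) :
    pvAmap (s ++ [x]) body_end = pvPatchLast (pvAmap s body_end) x ++ [pvMk x body_end (s.length + 1)] := by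
  rw [pvAmap, PySem.List.enumerate_append]
  simp only [List.map_append, PySem.List.enumerate_cons, PySem.List.enumerate_nil,
    List.map_cons, List.map_nil]
  rw [pvAmap, ← pvFront]
  congr 1
  rw [pvF]
  have hnlt : ¬ ((1 : Int) + (s.length : Int) < PySem.List.len (s ++ [x])) := by
    simp only [PySem.List.len_eq, List.length_append, List.length_cons, List.length_nil]
    push_cast; omega
  rw [if_neg hnlt]
  simp [pvMk]
  omega

-- A's fold is the map pvAmap
theorem pvA_eq_Amap (starts : List Int) (body_end : Int) :
    (PySem.List.enumerate starts 1).foldl (fun blocks p =>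
      blocks ++ [pvMk p.2 (if p.1 < PySem.List.len starts then PySem.List.pyGetD starts p.1 0 else body_end) p.1]) []
      = pvAmap starts body_end := by
  have hfun : (fun (blocks : List (List (String × Int))) (p : Int × Int) =>
      blocks ++ [pvMk p.2 (if p.1 < PySem.List.len starts then PySem.List.pyGetD starts p.1 0 else body_end) p.1])
      = fun blocks p => blocks ++ [pvF starts body_end p] := rfl
  rw [pvAmap, hfun, PySem.List.foldl_append_singleton_eq_map]
  simp

-- B's fold state over the starts list equals (pvAmap starts, starts.length)
theorem pvB_state (body_end : Int) (starts : List Int) :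
    starts.foldl (fun st (index : Int) =>
        (pvPatchLast st.1 index ++ [pvMk index body_end (st.2 + 1)], st.2 + 1))
      (([] : List (List (String × Int))), (0 : Int))
      = (pvAmap starts body_end, (starts.length : Int)) := by
  induction starts using List.reverseRecOn with
  | nil => simp [pvAmap]
  | append_singleton t x ih =>
    rw [List.foldl_append, ih]
    simp only [List.foldl_cons, List.foldl_nil]
    rw [pvAmap_snoc]
    simp

-- ===== VERDICT (by name: the statement is the Claim_ definition above) =====
theorem top_level_entry_blocks_spec : Claim_equal_top_level_entry_blocks := by
  intro lines body_start body_end _ _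
  unfold Spec_top_level_entry_blocks top_level_entry_blocks top_level_entry_blocks_alt
  rw [pvFoldlFilter]
  have hA := pvA_eq_Amap ((PySem.List.pyRange body_start body_end 1).filter
      (fun index => PySem.Str.startswith (PySem.List.pyGetD lines index "") "- ")) body_end
  have hB := pvB_state body_end ((PySem.List.pyRange body_start body_end 1).filter
      (fun index => PySem.Str.startswith (PySem.List.pyGetD lines index "") "- "))
  simp only [pvMk] at hA hB
  rw [hB]
  exact hA
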